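-- pv_equiv track=rewrite | github.com/rafalmaciasz/Algorithms-and-Data-Structure | Bloom.py | num_of_occurences
-- ===== SOURCE A (Python) =====
-- def num_of_occurences(S, idxs, subs):
--     result = {}
--     for sub in subs:
--         result[sub] = 0
--     N = len(subs[0])
--     for idx in idxs:
--         for sub in subs:
--             if sub == S[idx: idx + N]:
--                 result[sub] += 1
--     return result
-- ===== SOURCE B (Python) =====
-- def num_of_occurences(S, idxs, subs):
--     N = len(subs[0])
--     slice_counts = {}
--     for i in idxs:
--         t = S[i: i + N]
--         slice_counts[t] = slice_counts.get(t, 0) + 1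
--     result = {}
--     for sub in subs:
--         result[sub] = result.get(sub, 0) + slice_counts.get(sub, 0)
--     return result
-- ===== Notes on version B (the rewrite author's own statement) =====
-- stated objective: faster
-- what changed: Instead of scanning all subs for every index, B builds a dict counting each length-N slice once per index, then one pass over subs accumulates result[sub] from that count table.
import Mathlib
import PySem

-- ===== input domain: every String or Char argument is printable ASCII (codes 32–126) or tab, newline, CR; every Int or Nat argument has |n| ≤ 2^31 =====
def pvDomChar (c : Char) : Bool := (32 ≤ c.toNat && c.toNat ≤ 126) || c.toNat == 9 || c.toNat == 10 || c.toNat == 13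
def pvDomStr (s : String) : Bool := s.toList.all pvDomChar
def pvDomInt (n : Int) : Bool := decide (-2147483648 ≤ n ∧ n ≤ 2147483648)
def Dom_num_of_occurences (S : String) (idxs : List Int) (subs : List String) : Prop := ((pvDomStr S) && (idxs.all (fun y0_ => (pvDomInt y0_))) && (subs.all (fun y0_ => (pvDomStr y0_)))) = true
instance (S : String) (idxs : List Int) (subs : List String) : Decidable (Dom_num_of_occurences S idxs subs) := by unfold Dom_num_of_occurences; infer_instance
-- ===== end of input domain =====

-- B replaces A's per-index scan of all subs by a slice-count dict built in one pass over idxs (faster).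

-- ===== PORT A =====
def num_of_occurences (S : String) (idxs : List Int) (subs : List String) : List (String × Int) :=
  match subs with
  | [] => []  -- Python raises IndexError at len(subs[0]); excluded by Pre_
  | s0 :: _ =>
    let result : PySem.Dict String Int := subs.foldl (fun d sub => d.insert sub 0) PySem.Dict.empty
    let N : Int := PySem.Str.len s0
    let result := idxs.foldl (fun d idx =>
      subs.foldl (fun d sub =>
        if sub = PySem.Str.slice S (some idx) (some (idx + N)) then d.modify sub 0 (· + 1) else d) d) result
    result.items

-- ===== PORT B =====
def num_of_occurences_alt (S : String) (idxs : List Int) (subs : List String) : List (String × Int) :=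
  match subs with
  | [] => []  -- len(subs[0]) raises IndexError; excluded by Pre_
  | s0 :: _ =>
    let N : Int := PySem.Str.len s0
    let sliceCounts : PySem.Dict String Int := idxs.foldl (fun d i =>
      let t := PySem.Str.slice S (some i) (some (i + N))
      d.insert t (d.getD t 0 + 1)) PySem.Dict.empty
    let result : PySem.Dict String Int := subs.foldl (fun d sub =>
      d.insert sub (d.getD sub 0 + sliceCounts.getD sub 0)) PySem.Dict.empty
    result.items

-- ===== PRECONDITION & SPEC =====
-- Pre_ excludes only empty subs, on which A raises IndexError at len(subs[0]).
def Pre_num_of_occurences (S : String) (idxs : List Int) (subs : List String) : Prop := subs ≠ []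
instance (S : String) (idxs : List Int) (subs : List String) : Decidable (Pre_num_of_occurences S idxs subs) := by unfold Pre_num_of_occurences; infer_instance
def pvWitness_num_of_occurences : String × List Int × List String := ("abab", [0, 2, 1], ["ab", "ba", "ab"])
def Spec_num_of_occurences (S : String) (idxs : List Int) (subs : List String) (out : List (String × Int)) : Prop := out = num_of_occurences_alt S idxs subs
instance (S : String) (idxs : List Int) (subs : List String) (out : List (String × Int)) : Decidable (Spec_num_of_occurences S idxs subs out) := by unfold Spec_num_of_occurences; infer_instance

-- ===== CLAIM (what is proved, stated in full; the proofs are below) =====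
def Claim_equal_num_of_occurences : Prop := ∀ (S : String) (idxs : List Int) (subs : List String), Dom_num_of_occurences S idxs subs → Pre_num_of_occurences S idxs subs → Spec_num_of_occurences S idxs subs (num_of_occurences S idxs subs)

-- ===== LEMMAS AND PROOFS =====

lemma count_cons_ne (k s : String) (rest : List String) (h : ¬ k = s) :
    (s :: rest).count k = rest.count k := by
  simp [List.count_cons]
  exact fun e => h e.symm

-- the init loop 'for sub in subs: result[sub] = 0' leaves every key at 0
lemma getD_init (subs : List String) (d : PySem.Dict String Int) (k : String) :
    (subs.foldl (fun d sub => d.insert sub 0) d).getD k 0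
      = if k ∈ subs then 0 else d.getD k 0 := by
  induction subs generalizing d with
  | nil => simp
  | cons s rest ih =>
    rw [List.foldl_cons, ih, PySem.Dict.getD_insert]
    by_cases hk : k ∈ rest <;> by_cases hs : k = s <;> simp [hk, hs]

-- A's inner loop over subs at a fixed slice t adds (count of k in subs) iff k = t
lemma getD_innerA (t : String) (subs : List String) (d : PySem.Dict String Int) (k : String) :
    (subs.foldl (fun d sub => if sub = t then d.modify sub 0 (· + 1) else d) d).getD k 0
      = d.getD k 0 + (if k = t then ((subs.count k : Int)) else 0) := by
  induction subs generalizing d with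
  | nil => simp
  | cons s rest ih =>
    rw [List.foldl_cons]
    by_cases hst : s = t
    · subst hst
      rw [if_pos rfl, ih, PySem.Dict.getD_modify]
      by_cases hks : k = s
      · subst hks
        rw [if_pos rfl, if_pos rfl, if_pos rfl, List.count_cons_self]
        push_cast; ring
      · rw [if_neg hks, if_neg hks, if_neg hks]
    · rw [if_neg hst, ih]
      by_cases hkt : k = t
      · rw [if_pos hkt, if_pos hkt, count_cons_ne k s rest (fun h => hst (h.symm.trans hkt))]
      · rw [if_neg hkt, if_neg hkt]

-- A's outer loop: each key k gains (count k subs) per index whose slice equals k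
lemma getD_outerA (f : Int → String) (subs : List String) (idxs : List Int)
    (d : PySem.Dict String Int) (k : String) :
    (idxs.foldl (fun d idx =>
        subs.foldl (fun d sub => if sub = f idx then d.modify sub 0 (· + 1) else d) d) d).getD k 0
      = d.getD k 0 + (subs.count k : Int) * ((idxs.map f).count k : Int) := by
  induction idxs generalizing d with
  | nil => simp
  | cons i rest ih =>
    rw [List.foldl_cons, ih, getD_innerA, List.map_cons]
    by_cases h : k = f i
    · rw [if_pos h, ← h, List.count_cons_self]
      push_cast; ring
    · rw [if_neg h, add_zero, count_cons_ne k (f i) (rest.map f) h]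

-- B's result loop: each occurrence of k in subs adds c k
lemma getD_foldB (c : String → Int) (subs : List String) (d : PySem.Dict String Int) (k : String) :
    (subs.foldl (fun d sub => d.insert sub (d.getD sub 0 + c sub)) d).getD k 0
      = d.getD k 0 + (subs.count k : Int) * c k := by
  induction subs generalizing d with
  | nil => simp
  | cons s rest ih =>
    rw [List.foldl_cons, ih, PySem.Dict.getD_insert]
    by_cases hs : k = s
    · subst hs
      rw [if_pos rfl, List.count_cons_self]
      push_cast; ring
    · rw [if_neg hs, count_cons_ne k s rest hs]

-- A's inner loop only modifies keys already present, so the key list is unchanged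
lemma keys_innerA (t : String) (subs : List String) (d : PySem.Dict String Int)
    (h : ∀ s ∈ subs, s ∈ d.keys) :
    (subs.foldl (fun d sub => if sub = t then d.modify sub 0 (· + 1) else d) d).keys = d.keys := by
  induction subs generalizing d with
  | nil => simp
  | cons s rest ih =>
    rw [List.foldl_cons]
    by_cases hst : s = t
    · rw [if_pos hst]
      have hkeys : (d.modify s 0 (· + 1)).keys = d.keys := by
        rw [PySem.Dict.keys_modify, PySem.Dict.keys_insert_of_contains]
        exact (PySem.Dict.contains_iff_mem_keys d s).mpr (h s (by simp))
      rw [ih _ (by intro x hx; rw [hkeys]; exact h x (by simp [hx])), hkeys]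
    · rw [if_neg hst]
      exact ih _ (fun x hx => h x (by simp [hx]))

lemma keys_outerA (f : Int → String) (subs : List String) (idxs : List Int)
    (d : PySem.Dict String Int) (h : ∀ s ∈ subs, s ∈ d.keys) :
    (idxs.foldl (fun d idx =>
        subs.foldl (fun d sub => if sub = f idx then d.modify sub 0 (· + 1) else d) d) d).keys
      = d.keys := by
  induction idxs generalizing d with
  | nil => simp
  | cons i rest ih =>
    rw [List.foldl_cons, ih, keys_innerA _ _ _ h]
    intro x hx
    rw [keys_innerA _ _ _ h]
    exact h x hx

lemma keys_init (subs : List String) :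
    ((subs.foldl (fun d sub => d.insert sub (0 : Int)) PySem.Dict.empty)).keys
      = PySem.Set.ofList subs := by
  rw [PySem.Dict.keys_foldl_insert, PySem.Dict.keys_empty, PySem.Set.update_nil_left]

lemma keys_foldB (c : String → Int) (subs : List String) :
    ((subs.foldl (fun d sub => d.insert sub (d.getD sub 0 + c sub)) PySem.Dict.empty)).keys
      = PySem.Set.ofList subs := by
  rw [PySem.Dict.keys_foldl_insert, PySem.Dict.keys_empty, PySem.Set.update_nil_left]

-- ===== VERDICT (by name: the statement is the Claim_ definition above) =====
theorem num_of_occurences_spec : Claim_equal_num_of_occurences := by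
  intro S idxs subs _ hpre
  unfold Spec_num_of_occurences
  cases subs with
  | nil => exact absurd rfl hpre
  | cons s0 rest =>
    simp only [num_of_occurences, num_of_occurences_alt]
    set subs := s0 :: rest with hsubs
    set N : Int := PySem.Str.len s0 with hN
    set f : Int → String := fun i => PySem.Str.slice S (some i) (some (i + N)) with hf
    set d0 : PySem.Dict String Int := subs.foldl (fun d sub => d.insert sub 0) PySem.Dict.empty with hd0
    set dA : PySem.Dict String Int := idxs.foldl (fun d idx =>
      subs.foldl (fun d sub => if sub = f idx then d.modify sub 0 (· + 1) else d) d) d0 with hdA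
    set dc : PySem.Dict String Int := idxs.foldl (fun d i =>
      d.insert (f i) (d.getD (f i) 0 + 1)) PySem.Dict.empty with hdc
    set dB : PySem.Dict String Int := subs.foldl (fun d sub =>
      d.insert sub (d.getD sub 0 + dc.getD sub 0)) PySem.Dict.empty with hdB
    have hd0keys : d0.keys = PySem.Set.ofList subs := keys_init subs
    have hAkeys : dA.keys = PySem.Set.ofList subs := by
      rw [hdA, keys_outerA, hd0keys]
      intro s hs
      rw [hd0keys, PySem.Set.mem_ofList]
      exact hs
    have hBkeys : dB.keys = PySem.Set.ofList subs := keys_foldB _ subs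
    have hcnt : ∀ k, dc.getD k 0 = ((idxs.map f).count k : Int) := by
      intro k
      have hmap := List.foldl_map (f := f)
        (g := fun (d : PySem.Dict String Int) (t : String) => d.insert t (d.getD t 0 + 1))
        (l := idxs) (init := PySem.Dict.empty)
      rw [hdc, ← hmap, PySem.Dict.getD_foldl_insert_add_one]
      simp
    have hA : dA.items = dA.keys.map (fun k => (k, dA.getD k 0)) :=
      PySem.Dict.items_eq_map_keys dA (by rw [hAkeys]; exact PySem.Set.nodup_ofList subs) 0
    have hB : dB.items = dB.keys.map (fun k => (k, dB.getD k 0)) :=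
      PySem.Dict.items_eq_map_keys dB (by rw [hBkeys]; exact PySem.Set.nodup_ofList subs) 0
    rw [hA, hB, hAkeys, hBkeys]
    apply List.map_congr_left
    intro k hk
    have hkmem : k ∈ subs := (PySem.Set.mem_ofList subs k).mp hk
    have hvA : dA.getD k 0 = (subs.count k : Int) * ((idxs.map f).count k : Int) := by
      rw [hdA, getD_outerA, hd0, getD_init]
      simp [hkmem]
    have hvB : dB.getD k 0 = (subs.count k : Int) * ((idxs.map f).count k : Int) := by
      rw [hdB, getD_foldB, PySem.Dict.getD_empty, hcnt, zero_add]
    rw [hvA, hvB]
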